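-- pv_equiv track=rewrite | github.com/bagherilab/container-collection | src/container_collection/template/create_inputs_task.py | _find_seed_ranges
-- ===== SOURCE A (Python) =====
-- from itertools import groupby
--
-- def _find_seed_ranges(seeds, max_jobs):
--     sort = sorted([int(x) for x in seeds])
--     ranges = []
--     for _, group in groupby(enumerate(sort), lambda x: x[0] - x[1]):
--         group_list = list(group)
--         subset = True
--         range_start = group_list[0][1]
--         range_end = group_list[-1][1]
--
--         while subset:
--             ranges.append((range_start, min(range_end, range_start + max_jobs - 1)))
--             range_start = range_start + max_jobs
--             if range_start > range_end:
--                 subset = False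
--
--     return ranges
-- ===== SOURCE B (Python) =====
-- def _find_seed_ranges(seeds, max_jobs):
--     values = sorted(int(x) for x in seeds)
--     if not values:
--         return []
--     ranges = []
--     chunk_start = prev = values[0]
--     count = 1
--     for x in values[1:]:
--         if x == prev + 1 and count < max_jobs:
--             prev = x
--             count += 1
--         else:
--             ranges.append((chunk_start, prev))
--             chunk_start = prev = x
--             count = 1
--     ranges.append((chunk_start, prev))
--     return ranges
-- ===== Notes on version B (the rewrite author's own statement) =====
-- stated objective: simpler
-- what changed: Replaced A's two-phase groupby(enumerate)-then-nested-while structure with a single linear scan over the sorted values that maintains chunk_start, prev and a count, emitting a range on a gap or when the chunk reaches max_jobs elements.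
import Mathlib
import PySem

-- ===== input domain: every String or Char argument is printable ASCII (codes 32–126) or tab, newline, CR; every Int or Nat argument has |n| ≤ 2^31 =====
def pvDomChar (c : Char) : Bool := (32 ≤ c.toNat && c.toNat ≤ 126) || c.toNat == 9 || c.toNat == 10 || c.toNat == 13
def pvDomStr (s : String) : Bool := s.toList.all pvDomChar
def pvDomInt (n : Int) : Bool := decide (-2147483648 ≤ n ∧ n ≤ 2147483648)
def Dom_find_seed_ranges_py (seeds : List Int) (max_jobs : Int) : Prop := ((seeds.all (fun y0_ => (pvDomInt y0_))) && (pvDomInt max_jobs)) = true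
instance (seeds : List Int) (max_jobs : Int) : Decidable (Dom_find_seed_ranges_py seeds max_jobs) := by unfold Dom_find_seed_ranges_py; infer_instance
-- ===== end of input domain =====

-- B fuses A's group-then-chunk two-phase structure (groupby/enumerate + nested while)
-- into one linear scan tracking chunk_start/prev/count (objective: simpler decomposition).

-- ===== PORT A =====

-- enumerate(l) starting at index k (indices as Int, as Python does)
def pvEnumInt (k : Int) : List Int → List (Int × Int)
  | [] => []
  | x :: xs => (k, x) :: pvEnumInt (k + 1) xs

-- itertools.groupby: split into maximal runs of equal key (consecutive elements)
def pvGroupBy (key : Int × Int → Int) : List (Int × Int) → List (List (Int × Int))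
  | [] => []
  | x :: xs =>
    match pvGroupBy key xs with
    | [] => [[x]]
    | [] :: gs => [x] :: gs
    | (y :: g) :: gs =>
      if key x = key y then (x :: y :: g) :: gs else [x] :: (y :: g) :: gs

-- A's inner 'while subset' loop; the fuel ((range_end-range_start).toNat+1) only makes
-- the same computation total — it suffices whenever max_jobs ≥ 1 (Pre_)
def pvAWhile : Nat → Int → Int → Int → List (Int × Int)
  | 0, _, _, _ => []
  | n + 1, range_start, range_end, mj =>
    (range_start, min range_end (range_start + mj - 1)) ::
      (if range_start + mj > range_end then [] else pvAWhile n (range_start + mj) range_end mj)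

def find_seed_ranges_py (seeds : List Int) (max_jobs : Int) : List (Int × Int) :=
  -- int(x) on an int is the identity
  let sort := PySem.List.sorted (seeds.map (fun x => x)) (fun x => x) false
  (pvGroupBy (fun x => x.1 - x.2) (pvEnumInt 0 sort)).foldl
    (fun ranges group_list =>
      ranges ++
        match group_list with
        | [] => []  -- unreachable: groupby groups are nonempty
        | p :: ps =>
          let range_start := p.2
          let range_end := (List.getLastD ps p).2
          pvAWhile ((range_end - range_start).toNat + 1) range_start range_end max_jobs) []

-- ===== PORT B =====

def pvBLoop (mj : Int) : List Int → Int → Int → Int → List (Int × Int)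
  | [], chunk_start, prev, _ => [(chunk_start, prev)]
  | x :: rest, chunk_start, prev, count =>
    if x = prev + 1 ∧ count < mj then pvBLoop mj rest chunk_start x (count + 1)
    else (chunk_start, prev) :: pvBLoop mj rest x x 1

def find_seed_ranges_py_alt (seeds : List Int) (max_jobs : Int) : List (Int × Int) :=
  let values := PySem.List.sorted (seeds.map (fun x => x)) (fun x => x) false
  match values with
  | [] => []
  | v :: rest => pvBLoop max_jobs rest v v 1

-- ===== PRECONDITION & SPEC =====
-- Pre_ excludes max_jobs ≤ 0 with nonempty seeds: there A's 'while subset' loop never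
-- advances range_start past range_end, so A diverges (returns nothing to match).
def Pre_find_seed_ranges_py (seeds : List Int) (max_jobs : Int) : Prop :=
  1 ≤ max_jobs ∨ seeds = []
instance (seeds : List Int) (max_jobs : Int) : Decidable (Pre_find_seed_ranges_py seeds max_jobs) := by unfold Pre_find_seed_ranges_py; infer_instance

def pvWitness_find_seed_ranges_py : List Int × Int := ([4, 1, 2, 9, 3], 2)

def Spec_find_seed_ranges_py (seeds : List Int) (max_jobs : Int) (out : List (Int × Int)) : Prop := out = find_seed_ranges_py_alt seeds max_jobs
instance (seeds : List Int) (max_jobs : Int) (out : List (Int × Int)) : Decidable (Spec_find_seed_ranges_py seeds max_jobs out) := by unfold Spec_find_seed_ranges_py; infer_instance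

-- ===== CLAIM (what is proved, stated in full; the proofs are below) =====
def Claim_equal_find_seed_ranges_py : Prop := ∀ (seeds : List Int) (max_jobs : Int), Dom_find_seed_ranges_py seeds max_jobs → Pre_find_seed_ranges_py seeds max_jobs → Spec_find_seed_ranges_py seeds max_jobs (find_seed_ranges_py seeds max_jobs)

-- ===== LEMMAS AND PROOFS =====

-- the maximal run of consecutive successors of prev, and the remainder
def takeRun (prev : Int) : List Int → List Int × List Int
  | [] => ([], [])
  | x :: xs =>
    if x = prev + 1 then ((x :: (takeRun x xs).1), (takeRun x xs).2)
    else ([], x :: xs)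

lemma takeRun_snd_length_le (prev : Int) (l : List Int) :
    (takeRun prev l).2.length ≤ l.length := by
  induction l generalizing prev with
  | nil => simp [takeRun]
  | cons x xs ih =>
    simp only [takeRun]
    split
    · exact le_trans (ih x) (Nat.le_succ _)
    · simp

def runSplit : List Int → List (List Int)
  | [] => []
  | x :: xs => (x :: (takeRun x xs).1) :: runSplit (takeRun x xs).2
termination_by l => l.length
decreasing_by
  exact Nat.lt_succ_of_le (takeRun_snd_length_le x xs)

-- the canonical per-run chunking (A's while loop with adequate fuel)
def W (a b mj : Int) : List (Int × Int) := pvAWhile ((b - a).toNat + 1) a b mj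

def runBody (mj : Int) : List Int → List (Int × Int)
  | [] => []
  | y :: ys => W y (List.getLastD ys y) mj

-- the common normal form both programs compute
def C (mj : Int) (l : List Int) : List (Int × Int) := (runSplit l).flatMap (runBody mj)

-- run values are consecutive: last element of a run above p is p + run length
lemma takeRun_getLastD (p : Int) (l : List Int) :
    (takeRun p l).1.getLastD p = p + ((takeRun p l).1.length : Int) := by
  induction l generalizing p with
  | nil => simp [takeRun]
  | cons x xs ih =>
    simp only [takeRun]
    split
    · rename_i hx
      simp only [List.getLastD_cons, ih x, List.length_cons]
      push_cast
      omega
    · simp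

-- A's while loop computes the same list for ANY sufficient fuel (max_jobs ≥ 1)
lemma pvAWhile_fuel (n : Nat) : ∀ (a b mj : Int), 1 ≤ mj → a ≤ b → (b - a).toNat < n →
    pvAWhile n a b mj = W a b mj := by
  induction n using Nat.strong_induction_on with
  | _ n IH =>
    intro a b mj h1 hab hn
    match n with
    | 0 => omega
    | m + 1 =>
      rw [show W a b mj = pvAWhile ((b - a).toNat + 1) a b mj from rfl]
      simp only [pvAWhile]
      congr 1
      split_ifs with h
      · rfl
      · have hle : a + mj ≤ b := by omega
        have hdec : (b - (a + mj)).toNat < (b - a).toNat := by omega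
        rw [IH m (by omega) (a + mj) b mj h1 hle (by omega),
            IH ((b - a).toNat) (by omega) (a + mj) b mj h1 hle hdec]

lemma W_single (a b mj : Int) (_h1 : 1 ≤ mj) (_hab : a ≤ b) (hub : b ≤ a + mj - 1) :
    W a b mj = [(a, b)] := by
  simp only [W, pvAWhile]
  rw [if_pos (by omega), min_eq_left (by omega)]

lemma W_step (a b mj : Int) (h1 : 1 ≤ mj) (hab : a ≤ b) :
    W a b mj = (a, min b (a + mj - 1)) ::
      (if a + mj > b then [] else W (a + mj) b mj) := by
  conv_lhs => rw [show W a b mj = pvAWhile ((b - a).toNat + 1) a b mj from rfl]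
  simp only [pvAWhile]
  congr 1
  split_ifs with h
  · rfl
  · exact pvAWhile_fuel ((b - a).toNat) (a + mj) b mj h1 (by omega) (by omega)

lemma C_nil (mj : Int) : C mj [] = [] := by simp [C, runSplit]

lemma C_cons (mj x : Int) (xs : List Int) :
    C mj (x :: xs) = runBody mj (x :: (takeRun x xs).1) ++ C mj (takeRun x xs).2 := by
  rw [C, runSplit]
  simp [C]

lemma takeRun_cons (prev x : Int) (xs : List Int) :
    takeRun prev (x :: xs)
      = if x = prev + 1 then (x :: (takeRun x xs).1, (takeRun x xs).2)
        else ([], x :: xs) := rfl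

-- B's single pass, characterised: it finishes the current chunk/run and then behaves like C
lemma pvBLoop_char (mj : Int) (hmj : 1 ≤ mj) (l : List Int) :
    ∀ (cs prev cnt : Int), 1 ≤ cnt → cnt ≤ mj → prev = cs + cnt - 1 →
    pvBLoop mj l cs prev cnt =
      W cs (prev + ((takeRun prev l).1.length : Int)) mj ++ C mj (takeRun prev l).2 := by
  induction l with
  | nil =>
    intro cs prev cnt h1 h2 h3
    simp only [pvBLoop, takeRun, List.length_nil, Nat.cast_zero, add_zero, C_nil,
      List.append_nil]
    rw [W_single cs prev mj hmj (by omega) (by omega)]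
  | cons x xs ih =>
    intro cs prev cnt h1 h2 h3
    simp only [pvBLoop, takeRun_cons]
    by_cases hx : x = prev + 1
    · rw [if_pos hx]
      have he : prev + (((x :: (takeRun x xs).1, (takeRun x xs).2).1).length : Int)
          = x + ((takeRun x xs).1.length : Int) := by
        simp only [List.length_cons]; push_cast; omega
      rw [he]
      by_cases hc : cnt < mj
      · rw [if_pos ⟨hx, hc⟩, ih cs x (cnt + 1) (by omega) (by omega) (by omega)]
      · have hcm : cnt = mj := by omega
        rw [if_neg (by tauto), ih x x 1 (by omega) (by omega) (by omega),
            W_step cs (x + ((takeRun x xs).1.length : Int)) mj hmj (by omega),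
            if_neg (by omega), min_eq_right (by omega)]
        have hcs : cs + mj = x := by omega
        have hmin : cs + mj - 1 = prev := by omega
        rw [hmin, hcs]
        simp
    · rw [if_neg hx, if_neg (by tauto),
          ih x x 1 (by omega) (by omega) (by omega)]
      have h0 : prev + (((([] : List Int), x :: xs).1).length : Int) = prev := by
        simp
      rw [h0, W_single cs prev mj hmj (by omega) (by omega), C_cons]
      have hb : runBody mj (x :: (takeRun x xs).1)
          = W x (x + ((takeRun x xs).1.length : Int)) mj := by
        simp only [runBody]
        rw [takeRun_getLastD]
      rw [hb]
      simp

-- groupby's head group is nonempty and starts with the head element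
lemma pvGroupBy_cons (key : Int × Int → Int) (a : Int × Int) (t : List (Int × Int)) :
    ∃ g gs, pvGroupBy key (a :: t) = (a :: g) :: gs := by
  rcases h : pvGroupBy key t with _ | ⟨_ | ⟨y, g⟩, gs⟩
  · exact ⟨[], [], by simp [pvGroupBy, h]⟩
  · exact ⟨[], gs, by simp [pvGroupBy, h]⟩
  · by_cases hk : key a = key y
    · exact ⟨y :: g, gs, by simp [pvGroupBy, h, hk]⟩
    · exact ⟨[], (y :: g) :: gs, by simp [pvGroupBy, h, hk]⟩

lemma pvGroupBy_cons_eq (key : Int × Int → Int) (a y : Int × Int)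
    (t : List (Int × Int)) (g : List (Int × Int)) (gs : List (List (Int × Int)))
    (h : pvGroupBy key t = (y :: g) :: gs) :
    pvGroupBy key (a :: t)
      = if key a = key y then (a :: y :: g) :: gs else [a] :: (y :: g) :: gs := by
  simp [pvGroupBy, h]

-- the groups of groupby(enumerate(l), i - x), projected to values, are exactly the runs of l
lemma pvGroupBy_enum (l : List Int) : ∀ (k : Int),
    (pvGroupBy (fun x => x.1 - x.2) (pvEnumInt k l)).map (List.map Prod.snd) = runSplit l := by
  induction l with
  | nil => intro k; simp [pvEnumInt, pvGroupBy, runSplit]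
  | cons x xs ih =>
    intro k
    cases xs with
    | nil => simp [pvEnumInt, pvGroupBy, runSplit, takeRun]
    | cons y ys =>
      obtain ⟨g, gs, hG⟩ := pvGroupBy_cons (fun x => x.1 - x.2) (k + 1, y)
        (pvEnumInt (k + 1 + 1) ys)
      have ihy := ih (k + 1)
      rw [show pvEnumInt (k + 1) (y :: ys) = (k + 1, y) :: pvEnumInt (k + 1 + 1) ys from rfl,
          hG, runSplit] at ihy
      simp only [List.map_cons] at ihy
      have h1 : g.map Prod.snd = (takeRun y ys).1 :=
        ((List.cons.injEq _ _ _ _).mp (((List.cons.injEq _ _ _ _).mp ihy).1)).2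
      have h2 : gs.map (List.map Prod.snd) = runSplit (takeRun y ys).2 :=
        ((List.cons.injEq _ _ _ _).mp ihy).2
      rw [show pvEnumInt k (x :: y :: ys)
            = (k, x) :: (k + 1, y) :: pvEnumInt (k + 1 + 1) ys from rfl,
          pvGroupBy_cons_eq _ _ _ _ _ _ hG, runSplit, takeRun_cons]
      by_cases hy : y = x + 1
      · rw [if_pos (by simp; omega), if_pos hy]
        simp only [List.map_cons, h1, h2]
      · rw [if_neg (by simp; omega), if_neg hy]
        simp [h1, h2, runSplit]

-- the per-group body of A's fold depends only on the projected values
lemma body_eq (mj : Int) (g : List (Int × Int)) :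
    (match g with
      | [] => ([] : List (Int × Int))
      | p :: ps =>
        pvAWhile (((List.getLastD ps p).2 - p.2).toNat + 1) p.2 (List.getLastD ps p).2 mj)
      = runBody mj (g.map Prod.snd) := by
  cases g with
  | nil => rfl
  | cons p ps =>
    simp only [List.map_cons, runBody, W]
    have h : (List.getLastD ps p).2 = List.getLastD (ps.map Prod.snd) p.2 := by
      induction ps generalizing p with
      | nil => rfl
      | cons q qs ihq => simp only [List.getLastD_cons, List.map_cons, ihq q]
    rw [h]

-- A computes the normal form C on any value list (no hypotheses needed)
lemma A_char (seeds : List Int) (mj : Int) :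
    find_seed_ranges_py seeds mj
      = C mj (PySem.List.sorted (seeds.map (fun x => x)) (fun x => x) false) := by
  simp only [find_seed_ranges_py]
  rw [PySem.List.foldl_append_eq_flatMap, List.nil_append]
  set l := PySem.List.sorted (seeds.map (fun x => x)) (fun x => x) false
  calc (pvGroupBy (fun x => x.1 - x.2) (pvEnumInt 0 l)).flatMap _
      = (pvGroupBy (fun x => x.1 - x.2) (pvEnumInt 0 l)).flatMap
          (fun g => runBody mj (g.map Prod.snd)) := by
        apply List.flatMap_congr
        intro g _
        exact body_eq mj g
    _ = ((pvGroupBy (fun x => x.1 - x.2) (pvEnumInt 0 l)).map (List.map Prod.snd)).flatMap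
          (runBody mj) := by rw [List.flatMap_map]
    _ = (runSplit l).flatMap (runBody mj) := by rw [pvGroupBy_enum l 0]
    _ = C mj l := rfl

-- B computes the normal form C too (here max_jobs ≥ 1 is used)
lemma B_char (seeds : List Int) (mj : Int) (hmj : 1 ≤ mj) :
    find_seed_ranges_py_alt seeds mj
      = C mj (PySem.List.sorted (seeds.map (fun x => x)) (fun x => x) false) := by
  simp only [find_seed_ranges_py_alt]
  cases h : PySem.List.sorted (seeds.map (fun x => x)) (fun x => x) false with
  | nil => rw [C_nil]
  | cons v rest =>
    show pvBLoop mj rest v v 1 = C mj (v :: rest)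
    rw [pvBLoop_char mj hmj rest v v 1 (by omega) hmj (by omega), C_cons]
    have hb : runBody mj (v :: (takeRun v rest).1)
        = W v (v + ((takeRun v rest).1.length : Int)) mj := by
      simp only [runBody]
      rw [takeRun_getLastD]
    rw [hb]

-- ===== VERDICT (by name: the statement is the Claim_ definition above) =====
theorem find_seed_ranges_py_spec : Claim_equal_find_seed_ranges_py := by
  intro seeds mj _ hpre
  unfold Spec_find_seed_ranges_py
  rcases hpre with hmj | hnil
  · rw [A_char, B_char seeds mj hmj]
  · subst hnil
    rfl
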